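-- pv_equiv track=rewrite | github.com/UzairNadeem12/ISE_Game_Dev_Project | game/utils.py | permuted_matrix_encrypt
-- ===== SOURCE A (Python) =====
-- def permuted_matrix_encrypt(text, row_perm, col_perm):
--     """
--     Implements Matrix Transposition with row and column permutations
--     Args:
--         text: The text to encrypt
--         row_perm: List of integers representing row permutation (1-based)
--         col_perm: List of integers representing column permutation (1-based)
--     Example:
--         text = "HELLO"
--         row_perm = [2,1]  # 2nd row becomes 1st, 1st row becomes 2nd
--         col_perm = [3,1,2]  # 3rd col becomes 1st, 1st becomes 2nd, 2nd becomes 3rd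
--     """
--     # Remove spaces
--     text = text.replace(" ", "")
--     rows = len(row_perm)
--     cols = len(col_perm)
--     chunk_size = rows * cols
--     result = ''
--
--     # Process text in chunks
--     for i in range(0, len(text), chunk_size):
--         chunk = text[i:i+chunk_size]
--         # Pad the last chunk if needed
--         if len(chunk) < chunk_size:
--             chunk = chunk + 'X' * (chunk_size - len(chunk))
--
--         # Create matrix for this chunk
--         matrix = []
--         for j in range(0, len(chunk), cols):
--             matrix.append(list(chunk[j:j + cols]))
--
--         # Apply row permutation
--         new_matrix = []
--         for r in row_perm:
--             new_matrix.append(matrix[r-1])  # -1 because permutation is 1-based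
--
--         # Apply column permutation and read result
--         for c in col_perm:
--             for r in range(rows):
--                 result += new_matrix[r][c-1]  # -1 because permutation is 1-based
--
--     return result
-- ===== SOURCE B (Python) =====
-- def permuted_matrix_encrypt(text, row_perm, col_perm):
--     # Precompute the per-chunk gather permutation once, from row/column offsets
--     # built by modular index arithmetic; each chunk is then a single gather.
--     text = text.replace(" ", "")
--     rows = len(row_perm)
--     cols = len(col_perm)
--     chunk_size = rows * cols
--     row_off = [((r - 1) % rows) * cols for r in row_perm]
--     col_off = [(c - 1) % cols for c in col_perm]
--     perm = [ro + co for co in col_off for ro in row_off]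
--     pieces = []
--     for i in range(0, len(text), chunk_size):
--         chunk = text[i:i + chunk_size]
--         if len(chunk) < chunk_size:
--             chunk = chunk + 'X' * (chunk_size - len(chunk))
--         pieces.append(''.join(map(chunk.__getitem__, perm)))
--     return ''.join(pieces)
-- ===== Notes on version B (the rewrite author's own statement) =====
-- stated objective: alternative
-- what changed: B precomputes the per-chunk gather permutation once up front by modular index arithmetic and produces each chunk with a single gather, instead of rebuilding a character matrix, permuting its rows and scanning it column by column for every chunk.
import Mathlib
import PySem

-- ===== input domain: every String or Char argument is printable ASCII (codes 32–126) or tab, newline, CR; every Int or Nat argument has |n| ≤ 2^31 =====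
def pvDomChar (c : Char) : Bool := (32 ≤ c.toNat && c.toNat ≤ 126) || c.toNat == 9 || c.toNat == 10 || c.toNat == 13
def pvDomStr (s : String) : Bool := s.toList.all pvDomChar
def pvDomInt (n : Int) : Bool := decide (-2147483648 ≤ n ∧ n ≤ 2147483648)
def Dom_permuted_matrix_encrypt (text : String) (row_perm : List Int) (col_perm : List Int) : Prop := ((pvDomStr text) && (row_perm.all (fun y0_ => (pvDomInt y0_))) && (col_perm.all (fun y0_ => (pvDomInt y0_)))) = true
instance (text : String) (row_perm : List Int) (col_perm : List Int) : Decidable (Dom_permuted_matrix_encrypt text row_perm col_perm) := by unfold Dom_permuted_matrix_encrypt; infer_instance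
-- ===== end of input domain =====

-- B precomputes the per-chunk gather permutation once by index arithmetic and gathers each chunk
-- through it, instead of rebuilding and scanning a character matrix per chunk (objective: alternative).

-- ===== PORT A =====
def permuted_matrix_encrypt (text : String) (row_perm : List Int) (col_perm : List Int) : String :=
  let t := PySem.Chars.replace text.toList [' '] []
  let rows : Nat := row_perm.length
  let cols : Nat := col_perm.length
  let chunk_size : Nat := rows * cols
  let result := (PySem.List.pyRange 0 (t.length : Int) (chunk_size : Int)).foldl (fun result i =>
      let chunk0 := PySem.List.slice t (some i) (some (i + (chunk_size : Int)))
      let chunk := if chunk0.length < chunk_size then chunk0 ++ List.replicate (chunk_size - chunk0.length) 'X' else chunk0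
      let matrix := (PySem.List.pyRange 0 (chunk.length : Int) (cols : Int)).foldl
          (fun m j => m ++ [PySem.List.slice chunk (some j) (some (j + (cols : Int)))]) []
      let new_matrix := row_perm.foldl (fun nm r => nm ++ [PySem.List.pyGetD matrix (r - 1) []]) []
      col_perm.foldl (fun res c =>
        (PySem.List.pyRange 0 (rows : Int) 1).foldl (fun res r =>
          res ++ [PySem.List.pyGetD (PySem.List.pyGetD new_matrix r []) (c - 1) ' ']) res) result)
    []
  String.mk result

-- ===== PORT B =====
def permuted_matrix_encrypt_alt (text : String) (row_perm : List Int) (col_perm : List Int) : String :=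
  let t := PySem.Chars.replace text.toList [' '] []
  let rows : Nat := row_perm.length
  let cols : Nat := col_perm.length
  let chunk_size : Nat := rows * cols
  let row_off : List Int := row_perm.map (fun r => PySem.Int.mod (r - 1) (rows : Int) * (cols : Int))
  let col_off : List Int := col_perm.map (fun c => PySem.Int.mod (c - 1) (cols : Int))
  let perm : List Int := col_off.flatMap (fun co => row_off.map (fun ro => ro + co))
  let pieces := (PySem.List.pyRange 0 (t.length : Int) (chunk_size : Int)).foldl (fun pieces i =>
      let chunk0 := PySem.List.slice t (some i) (some (i + (chunk_size : Int)))
      let chunk := if chunk0.length < chunk_size then chunk0 ++ List.replicate (chunk_size - chunk0.length) 'X' else chunk0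
      pieces ++ [perm.map (fun k => PySem.List.pyGetD chunk k 'X')]) []
  String.mk (PySem.Chars.join [] pieces)

-- ===== PRECONDITION & SPEC =====
-- Pre_ is exactly where Python A returns: rows*cols > 0 (otherwise range(0, len, 0) raises ValueError),
-- and either the de-spaced text is empty (the loop never runs) or every 1-based permutation entry is a
-- valid Python index after the -1 shift (otherwise the loop's matrix[r-1] / row[c-1] raises IndexError).
def Pre_permuted_matrix_encrypt (text : String) (row_perm : List Int) (col_perm : List Int) : Prop :=
  0 < row_perm.length * col_perm.length ∧
  (PySem.Chars.replace text.toList [' '] [] = [] ∨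
    ((∀ r ∈ row_perm, 1 - (row_perm.length : Int) ≤ r ∧ r ≤ (row_perm.length : Int)) ∧
     (∀ c ∈ col_perm, 1 - (col_perm.length : Int) ≤ c ∧ c ≤ (col_perm.length : Int))))
instance (text : String) (row_perm : List Int) (col_perm : List Int) : Decidable (Pre_permuted_matrix_encrypt text row_perm col_perm) := by
  unfold Pre_permuted_matrix_encrypt; infer_instance

def pvWitness_permuted_matrix_encrypt : String × List Int × List Int := ("HELLO WORLD", [2, 1], [3, 1, 2])

def Spec_permuted_matrix_encrypt (text : String) (row_perm : List Int) (col_perm : List Int) (out : String) : Prop := out = permuted_matrix_encrypt_alt text row_perm col_perm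
instance (text : String) (row_perm : List Int) (col_perm : List Int) (out : String) : Decidable (Spec_permuted_matrix_encrypt text row_perm col_perm out) := by unfold Spec_permuted_matrix_encrypt; infer_instance

-- ===== CLAIM (what is proved, stated in full; the proofs are below) =====
def Claim_equal_permuted_matrix_encrypt : Prop := ∀ (text : String) (row_perm : List Int) (col_perm : List Int), Dom_permuted_matrix_encrypt text row_perm col_perm → Pre_permuted_matrix_encrypt text row_perm col_perm → Spec_permuted_matrix_encrypt text row_perm col_perm (permuted_matrix_encrypt text row_perm col_perm)

-- ===== LEMMAS AND PROOFS =====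

-- Python's normalised list index (for -len ≤ i < len) as a Nat.
def pvNidx (len : Nat) (i : Int) : Nat := (if 0 ≤ i then i else (len : Int) + i).toNat

theorem pvNidx_lt (len : Nat) (i : Int) (h1 : -(len : Int) ≤ i) (h2 : i < (len : Int)) :
    pvNidx len i < len := by
  unfold pvNidx; split <;> omega

theorem pyGetD_pvNidx {α : Type} (xs : List α) (i : Int) (d : α)
    (h1 : -(xs.length : Int) ≤ i) (h2 : i < (xs.length : Int)) :
    PySem.List.pyGetD xs i d = xs.getD (pvNidx xs.length i) d := by
  by_cases h : 0 ≤ i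
  · rw [PySem.List.pyGetD_eq_getElem xs d h h2]
    rw [List.getD_eq_getElem xs d (by unfold pvNidx; split <;> omega)]
    congr 1
    unfold pvNidx; split <;> omega
  · have hk : i = -((((-i).toNat : Nat)) : Int) := by omega
    rw [hk, PySem.List.pyGetD_neg_natCast xs (-i).toNat d (by omega) (by omega)]
    rw [List.getD_eq_getElem xs d (by unfold pvNidx; split <;> omega)]
    congr 1
    unfold pvNidx; split <;> omega

-- Python's i % n equals the normalised index for -n ≤ i < n.
theorem pvMod_nidx (n : Nat) (i : Int) (hn : 0 < n) (h1 : -(n : Int) ≤ i) (h2 : i < (n : Int)) :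
    PySem.Int.mod i (n : Int) = ((pvNidx n i : Nat) : Int) := by
  rw [PySem.Int.mod_eq_emod_of_pos (by exact_mod_cast hn)]
  unfold pvNidx
  by_cases h : 0 ≤ i
  · rw [if_pos h, Int.emod_eq_of_lt h h2]
    omega
  · rw [if_neg h]
    have e : i % (n : Int) = (i + (n : Int)) % (n : Int) := by
      conv_lhs => rw [← Int.add_mul_emod_self_left (a := i) (b := (n : Int)) (c := 1)]
      ring_nf
    rw [e, Int.emod_eq_of_lt (by omega) (by omega)]
    omega


theorem pvMapOverIdx {β γ : Type} (m : List β) (d : β) (f : β → γ) (n : Nat)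
    (hn : m.length = n) :
    (List.range n).map (fun i => f (m.getD i d)) = m.map f := by
  subst hn
  apply List.ext_getElem (by simp)
  intro i h1 h2
  simp only [List.getElem_map, List.getElem_range]
  rw [List.getD_eq_getElem m d (by simpa using h2)]

theorem pvMatrix_eq (chunk : List Char) (rows cols : Nat) (hcols : 0 < cols)
    (hlen : chunk.length = rows * cols) :
    (PySem.List.pyRange 0 (chunk.length : Int) (cols : Int)).foldl
        (fun m j => m ++ [PySem.List.slice chunk (some j) (some (j + (cols : Int)))]) []
      = (List.range rows).map (fun x => (chunk.drop (x * cols)).take cols) := by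
  rw [PySem.List.pyRange_of_pos 0 (chunk.length : Int) (by exact_mod_cast hcols)]
  have hcnt : (if (0 : Int) < (chunk.length : Int)
      then (((chunk.length : Int) - 0 + (cols : Int) - 1) / (cols : Int)).toNat else 0) = rows := by
    by_cases hrows : rows = 0
    · subst hrows
      simp at hlen
      simp [hlen]
    · have hpos : 0 < chunk.length := by
        rw [hlen]; exact Nat.mul_pos (Nat.pos_of_ne_zero hrows) hcols
      rw [if_pos (by exact_mod_cast hpos)]
      have e1 : (chunk.length : Int) - 0 + (cols : Int) - 1 = ((rows * cols + cols - 1 : Nat) : Int) := by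
        rw [hlen]; push_cast; omega
      rw [e1, ← Int.natCast_div, Int.toNat_natCast]
      have hm : rows * cols = cols * rows := Nat.mul_comm rows cols
      have e2 : rows * cols + cols - 1 = (cols - 1) + cols * rows := by omega
      rw [e2, Nat.add_mul_div_left _ _ hcols, Nat.div_eq_of_lt (by omega)]
      omega
  rw [hcnt, List.foldl_map, PySem.List.foldl_append_singleton_eq_map, List.nil_append]
  apply List.map_congr_left
  intro k hk
  have h1 : (0 : Int) + (cols : Int) * (k : Int) = ((k * cols : Nat) : Int) := by push_cast; ring
  rw [h1]
  have h2 : ((k * cols : Nat) : Int) + (cols : Int) = ((k * cols : Nat) : Int) + ((cols : Nat) : Int) := rfl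
  rw [h2, PySem.List.slice_natCast_add]

theorem pvChunk (row_perm col_perm : List Int) (chunk : List Char)
    (hr : ∀ r ∈ row_perm, 1 - (row_perm.length : Int) ≤ r ∧ r ≤ (row_perm.length : Int))
    (hcp : ∀ c ∈ col_perm, 1 - (col_perm.length : Int) ≤ c ∧ c ≤ (col_perm.length : Int))
    (hlen : chunk.length = row_perm.length * col_perm.length)
    (hrows : 0 < row_perm.length) (hcols : 0 < col_perm.length) :
    col_perm.flatMap (fun c => (PySem.List.pyRange 0 (row_perm.length : Int) 1).map (fun r =>
      PySem.List.pyGetD (PySem.List.pyGetD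
        (row_perm.map (fun rr => PySem.List.pyGetD
          ((PySem.List.pyRange 0 (chunk.length : Int) (col_perm.length : Int)).foldl
             (fun m j => m ++ [PySem.List.slice chunk (some j) (some (j + (col_perm.length : Int)))]) [])
          (rr - 1) [])) r []) (c - 1) ' '))
    = List.map (fun k => PySem.List.pyGetD chunk k 'X')
        (col_perm.flatMap (fun c => row_perm.map (fun r =>
          PySem.Int.mod (r - 1) (row_perm.length : Int) * (col_perm.length : Int)
            + PySem.Int.mod (c - 1) (col_perm.length : Int)))) := by
  set rows := row_perm.length with hrowsdef
  set cols := col_perm.length with hcolsdef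
  rw [pvMatrix_eq chunk rows cols hcols hlen]
  rw [List.map_flatMap]
  apply List.flatMap_congr
  intro c hcmem
  obtain ⟨hc1, hc2⟩ := hcp c hcmem
  rw [List.map_map, PySem.List.pyRange_one]
  simp only [Int.sub_zero, Int.toNat_natCast, List.map_map]
  simp only [Function.comp_def, zero_add, PySem.List.pyGetD_natCast]
  rw [pvMapOverIdx (row_perm.map (fun rr => PySem.List.pyGetD
        ((List.range rows).map (fun x => (chunk.drop (x * cols)).take cols)) (rr - 1) []))
      [] (fun row => PySem.List.pyGetD row (c - 1) ' ') rows (by simp [hrowsdef])]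
  rw [List.map_map]
  apply List.map_congr_left
  intro rr hrrmem
  obtain ⟨h1, h2⟩ := hr rr hrrmem
  simp only [Function.comp_def]
  rw [pyGetD_pvNidx _ (rr - 1) _ (by simp only [List.length_map, List.length_range]; omega)
      (by simp only [List.length_map, List.length_range]; omega)]
  simp only [List.length_map, List.length_range]
  have hxlt : pvNidx rows (rr - 1) < rows := pvNidx_lt rows _ (by omega) (by omega)
  set x := pvNidx rows (rr - 1) with hx
  rw [List.getD_eq_getElem _ _ (by simpa using hxlt)]
  simp only [List.getElem_map, List.getElem_range]
  have hprod : (x + 1) * cols ≤ rows * cols := Nat.mul_le_mul_right cols (by omega)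
  have hprod' : (x + 1) * cols = x * cols + cols := by ring
  have hrowlen : (List.take cols (List.drop (x * cols) chunk)).length = cols := by
    simp only [List.length_take, List.length_drop, hlen]
    omega
  rw [pyGetD_pvNidx _ (c - 1) _ (by rw [hrowlen]; omega) (by rw [hrowlen]; omega)]
  simp only [hrowlen]
  have hylt : pvNidx cols (c - 1) < cols := pvNidx_lt cols _ (by omega) (by omega)
  set y := pvNidx cols (c - 1) with hy
  rw [List.getD_eq_getElem _ _ (by rw [hrowlen]; exact hylt)]
  simp only [List.getElem_take, List.getElem_drop]
  rw [pvMod_nidx rows (rr - 1) hrows (by omega) (by omega),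
    pvMod_nidx cols (c - 1) hcols (by omega) (by omega)]
  rw [show ((x : Nat) : Int) * (cols : Int) + ((y : Nat) : Int) = ((x * cols + y : Nat) : Int)
    from by push_cast; ring]
  rw [PySem.List.pyGetD_natCast]
  rw [List.getD_eq_getElem _ _ (by rw [hlen]; omega)]

theorem pvDoubleFoldl {α β γ : Type} (l1 : List α) (l2 : List β) (g : α → β → γ) (acc : List γ) :
    l1.foldl (fun res c => l2.foldl (fun res r => res ++ [g c r]) res) acc
      = acc ++ l1.flatMap (fun c => l2.map (g c)) := by
  have hf : (fun (res : List γ) (c : α) => l2.foldl (fun res r => res ++ [g c r]) res)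
      = fun res c => res ++ l2.map (g c) := by
    funext res c
    exact PySem.List.foldl_append_singleton_eq_map _ _ _
  rw [hf, PySem.List.foldl_append_eq_flatMap]

theorem pvFoldlFlat {α : Type} {γ : Type} (L : List α) (f : List γ → α → List γ) (g : α → List γ)
    (h : ∀ (acc : List γ), ∀ i ∈ L, f acc i = acc ++ g i) : L.foldl f [] = L.flatMap g := by
  rw [PySem.List.foldl_congr_mem L f (fun acc i => acc ++ g i) [] h,
    PySem.List.foldl_append_eq_flatMap, List.nil_append]

theorem pvJoin_nil_sep (ps : List (List Char)) : PySem.Chars.join [] ps = ps.flatten := by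
  induction ps with
  | nil => simp [PySem.Chars.join_nil]
  | cons p ps ih =>
    cases ps with
    | nil => simp [PySem.Chars.join_singleton]
    | cons q qs => simp [PySem.Chars.join_cons_cons, ih]

-- ===== VERDICT (by name: the statement is the Claim_ definition above) =====
theorem permuted_matrix_encrypt_spec : Claim_equal_permuted_matrix_encrypt := by
  intro text row_perm col_perm _ hpre
  obtain ⟨hcs, hpre2⟩ := hpre
  have hrowpos : 0 < row_perm.length := by
    rcases Nat.mul_ne_zero_iff.mp (Nat.pos_iff_ne_zero.mp hcs) with ⟨h1, -⟩
    omega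
  have hcolpos : 0 < col_perm.length := by
    rcases Nat.mul_ne_zero_iff.mp (Nat.pos_iff_ne_zero.mp hcs) with ⟨-, h2⟩
    omega
  unfold Spec_permuted_matrix_encrypt permuted_matrix_encrypt permuted_matrix_encrypt_alt
  dsimp only
  rcases hpre2 with hstr | ⟨hr, hcp⟩
  · rw [hstr]
    simp [PySem.List.pyRange, PySem.Chars.join_nil]
  · apply congrArg
    rw [PySem.List.foldl_append_singleton_eq_map, List.nil_append, pvJoin_nil_sep,
      ← List.flatMap_def]
    rw [show (col_perm.map (fun c => PySem.Int.mod (c - 1) (col_perm.length : Int))).flatMap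
        (fun co => (row_perm.map (fun r =>
          PySem.Int.mod (r - 1) (row_perm.length : Int) * (col_perm.length : Int))).map
          (fun ro => ro + co))
      = col_perm.flatMap (fun c => row_perm.map (fun r =>
          PySem.Int.mod (r - 1) (row_perm.length : Int) * (col_perm.length : Int)
            + PySem.Int.mod (c - 1) (col_perm.length : Int)))
      from by simp [List.flatMap_map, List.map_map, Function.comp_def]]
    apply pvFoldlFlat
    intro acc i hi
    have hi' := (PySem.List.mem_pyRange_iff_of_pos
      (by exact_mod_cast hcs) i).mp hi
    have h0i : 0 ≤ i := hi'.1
    rw [pvDoubleFoldl]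
    congr 1
    rw [PySem.List.foldl_append_singleton_eq_map, List.nil_append]
    have hsl := PySem.List.slice_toNat (PySem.Chars.replace text.toList [' '] []) h0i
      (show (0:Int) ≤ i + ((row_perm.length * col_perm.length : Nat) : Int) by positivity)
    have hlen0 : (PySem.List.slice (PySem.Chars.replace text.toList [' '] []) (some i)
        (some (i + ((row_perm.length * col_perm.length : Nat) : Int)))).length
        ≤ row_perm.length * col_perm.length := by
      rw [hsl]
      simp only [List.length_take, List.length_drop]
      omega
    have hclen : (if (PySem.List.slice (PySem.Chars.replace text.toList [' '] []) (some i)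
          (some (i + ((row_perm.length * col_perm.length : Nat) : Int)))).length
          < row_perm.length * col_perm.length
        then (PySem.List.slice (PySem.Chars.replace text.toList [' '] []) (some i)
            (some (i + ((row_perm.length * col_perm.length : Nat) : Int))))
          ++ List.replicate (row_perm.length * col_perm.length -
            (PySem.List.slice (PySem.Chars.replace text.toList [' '] []) (some i)
              (some (i + ((row_perm.length * col_perm.length : Nat) : Int)))).length) 'X'
        else PySem.List.slice (PySem.Chars.replace text.toList [' '] []) (some i)
          (some (i + ((row_perm.length * col_perm.length : Nat) : Int)))).length
        = row_perm.length * col_perm.length := by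
      split_ifs with h
      · simp only [List.length_append, List.length_replicate]
        omega
      · omega
    exact pvChunk row_perm col_perm _ hr hcp hclen hrowpos hcolpos
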